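-- pv_equiv track=rewrite | github.com/skittlesvampir/nnn-2023-statistics | generate_vocabulary.py | add_sentence_to_frequency_dict
-- ===== SOURCE A (Python) =====
-- def add_sentence_to_frequency_dict(sentence, frequency_dict, is_positive):
--     if is_positive:
--         key = "positive_words"
--         other_key = "negative_words"
--     else:
--         key = "negative_words"
--         other_key = "positive_words"
--
--     for word in sentence:
--         if word not in frequency_dict[key]:
--             frequency_dict[key][word] = 0
--         if word not in frequency_dict[other_key]:
--             frequency_dict[other_key][word] = 0
--
--         frequency_dict[key][word] += 1
--
--     return frequency_dict
-- ===== SOURCE B (Python) =====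
-- def add_sentence_to_frequency_dict(sentence, frequency_dict, is_positive):
--     if is_positive:
--         key, other_key = "positive_words", "negative_words"
--     else:
--         key, other_key = "negative_words", "positive_words"
--
--     # One pass to aggregate word frequencies (insertion order = first appearance),
--     # then one pass over the distinct words to apply them.
--     counts = {}
--     for word in sentence:
--         counts[word] = counts.get(word, 0) + 1
--
--     key_dict = frequency_dict[key]
--     other_dict = frequency_dict[other_key]
--     for word, count in counts.items():
--         key_dict[word] = key_dict.get(word, 0) + count
--         other_dict.setdefault(word, 0)
--
--     return frequency_dict
-- ===== Notes on version B (the rewrite author's own statement) =====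
-- stated objective: alternative
-- what changed: B first aggregates the sentence into a word->count map in one pass and then applies each distinct word once (add count to the key dict, setdefault 0 in the other dict), instead of A's per-occurrence membership-test-and-increment updates of the nested dicts.
-- outside the precondition, e.g. on add_sentence_to_frequency_dict([], {}, True): A returns {}, B raises KeyError; on add_sentence_to_frequency_dict(['a'], {'positive_words': {}}, True): A raises KeyError, B raises KeyError
import Mathlib
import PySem

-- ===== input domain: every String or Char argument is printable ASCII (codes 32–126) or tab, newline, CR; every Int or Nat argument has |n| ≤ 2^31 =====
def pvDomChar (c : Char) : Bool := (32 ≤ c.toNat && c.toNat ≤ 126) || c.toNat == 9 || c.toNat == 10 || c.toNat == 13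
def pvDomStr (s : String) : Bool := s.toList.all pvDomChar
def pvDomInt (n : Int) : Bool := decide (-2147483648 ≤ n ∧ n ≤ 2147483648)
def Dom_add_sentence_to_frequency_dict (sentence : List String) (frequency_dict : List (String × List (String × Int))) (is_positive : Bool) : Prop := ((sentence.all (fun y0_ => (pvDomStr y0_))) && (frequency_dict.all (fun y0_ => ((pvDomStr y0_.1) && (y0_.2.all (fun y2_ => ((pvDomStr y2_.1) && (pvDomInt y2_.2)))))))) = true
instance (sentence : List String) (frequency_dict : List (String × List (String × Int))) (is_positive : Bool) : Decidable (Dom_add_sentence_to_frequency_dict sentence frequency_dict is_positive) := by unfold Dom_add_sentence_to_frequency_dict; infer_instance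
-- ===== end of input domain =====

-- B aggregates the sentence into a word→count dict first and then applies each distinct word
-- once, instead of A's per-occurrence membership-test-and-increment updates (objective: alternative).
-- Both Pythons mutate frequency_dict's inner dicts in place the same way; the proof is about the return value.

-- ===== PORT A =====
def add_sentence_to_frequency_dict (sentence : List String) (frequency_dict : List (String × List (String × Int))) (is_positive : Bool) : List (String × List (String × Int)) :=
  let key := if is_positive then "positive_words" else "negative_words"
  let other_key := if is_positive then "negative_words" else "positive_words"
  let d : PySem.Dict String (PySem.Dict String Int) :=
    PySem.Dict.mk (frequency_dict.map (fun p => (p.1, PySem.Dict.mk p.2)))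
  let d := sentence.foldl (fun d word =>
    -- if word not in frequency_dict[key]: frequency_dict[key][word] = 0
    let d := if (d.getD key PySem.Dict.empty).contains word then d
             else d.insert key ((d.getD key PySem.Dict.empty).insert word 0)
    -- if word not in frequency_dict[other_key]: frequency_dict[other_key][word] = 0
    let d := if (d.getD other_key PySem.Dict.empty).contains word then d
             else d.insert other_key ((d.getD other_key PySem.Dict.empty).insert word 0)
    -- frequency_dict[key][word] += 1   (word is present here, so modify with default 0 is exact)
    d.insert key ((d.getD key PySem.Dict.empty).modify word 0 (· + 1))) d
  d.items.map (fun p => (p.1, p.2.items))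

-- ===== PORT B =====
def add_sentence_to_frequency_dict_alt (sentence : List String) (frequency_dict : List (String × List (String × Int))) (is_positive : Bool) : List (String × List (String × Int)) :=
  let key := if is_positive then "positive_words" else "negative_words"
  let other_key := if is_positive then "negative_words" else "positive_words"
  let d : PySem.Dict String (PySem.Dict String Int) :=
    PySem.Dict.mk (frequency_dict.map (fun p => (p.1, PySem.Dict.mk p.2)))
  -- counts[word] = counts.get(word, 0) + 1
  let counts := sentence.foldl (fun c w => c.insert w (c.getD w 0 + 1)) PySem.Dict.empty
  let key_dict := d.getD key PySem.Dict.empty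
  let other_dict := d.getD other_key PySem.Dict.empty
  -- for word, count in counts.items(): key_dict[word] = key_dict.get(word, 0) + count; other_dict.setdefault(word, 0)
  let p := counts.items.foldl (fun p wc =>
      (p.1.insert wc.1 (p.1.getD wc.1 0 + wc.2), p.2.setdefault wc.1 0)) (key_dict, other_dict)
  ((d.insert key p.1).insert other_key p.2).items.map (fun q => (q.1, q.2.items))

-- ===== PRECONDITION & SPEC =====
-- Pre_ requires the two keys "positive_words"/"negative_words" to be present: B looks them up
-- unconditionally and raises KeyError when one is missing, while A only touches them per word
-- (so A returns the dict unchanged when the sentence is empty). It also requires all association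
-- lists to have unique keys — the representation invariant of Python dicts: an assoc list with
-- duplicate keys denotes no Python dict.
def Pre_add_sentence_to_frequency_dict (sentence : List String) (frequency_dict : List (String × List (String × Int))) (is_positive : Bool) : Prop :=
  "positive_words" ∈ frequency_dict.map (·.1) ∧
  "negative_words" ∈ frequency_dict.map (·.1) ∧
  (frequency_dict.map (·.1)).Nodup ∧
  ∀ p ∈ frequency_dict, (p.2.map (·.1)).Nodup
instance (sentence : List String) (frequency_dict : List (String × List (String × Int))) (is_positive : Bool) : Decidable (Pre_add_sentence_to_frequency_dict sentence frequency_dict is_positive) := by unfold Pre_add_sentence_to_frequency_dict; infer_instance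
def pvWitness_add_sentence_to_frequency_dict : List String × (List (String × List (String × Int))) × Bool :=
  (["good", "bad", "good"], [("positive_words", [("good", 1)]), ("negative_words", [])], true)

def Spec_add_sentence_to_frequency_dict (sentence : List String) (frequency_dict : List (String × List (String × Int))) (is_positive : Bool) (out : List (String × List (String × Int))) : Prop := out = add_sentence_to_frequency_dict_alt sentence frequency_dict is_positive
instance (sentence : List String) (frequency_dict : List (String × List (String × Int))) (is_positive : Bool) (out : List (String × List (String × Int))) : Decidable (Spec_add_sentence_to_frequency_dict sentence frequency_dict is_positive out) := by unfold Spec_add_sentence_to_frequency_dict; infer_instance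

-- ===== CLAIM (what is proved, stated in full; the proofs are below) =====
def Claim_equal_add_sentence_to_frequency_dict : Prop := ∀ (sentence : List String) (frequency_dict : List (String × List (String × Int))) (is_positive : Bool), Dom_add_sentence_to_frequency_dict sentence frequency_dict is_positive → Pre_add_sentence_to_frequency_dict sentence frequency_dict is_positive → Spec_add_sentence_to_frequency_dict sentence frequency_dict is_positive (add_sentence_to_frequency_dict sentence frequency_dict is_positive)

-- ===== LEMMAS AND PROOFS =====

-- A's per-occurrence update of the key-side inner dict
def pvBump (d : PySem.Dict String Int) (w : String) : PySem.Dict String Int :=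
  d.insert w (d.getD w 0 + 1)
-- A's per-occurrence update of the other-side inner dict
def pvZero (d : PySem.Dict String Int) (w : String) : PySem.Dict String Int :=
  if d.contains w then d else d.insert w 0
-- B's per-distinct-word update of the key-side inner dict (c w = count of w in the sentence)
def pvGC (c : String → Int) (d : PySem.Dict String Int) (w : String) : PySem.Dict String Int :=
  d.insert w (d.getD w 0 + c w)
-- A's whole per-word step on the outer dict
def pvStepA (key other_key : String) (d : PySem.Dict String (PySem.Dict String Int)) (word : String) : PySem.Dict String (PySem.Dict String Int) :=
  let d := if (d.getD key PySem.Dict.empty).contains word then d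
           else d.insert key ((d.getD key PySem.Dict.empty).insert word 0)
  let d := if (d.getD other_key PySem.Dict.empty).contains word then d
           else d.insert other_key ((d.getD other_key PySem.Dict.empty).insert word 0)
  d.insert key ((d.getD key PySem.Dict.empty).modify word 0 (· + 1))

theorem pv_insert_comm_of_contains {ν : Type} (d : PySem.Dict String ν) (x w : String) (v u : ν)
    (hx : d.contains x = true) (hne : w ≠ x) :
    (d.insert x v).insert w u = (d.insert w u).insert x v := by
  apply PySem.Dict.ext
  have hx' : (d.insert w u).contains x = true := by
    rw [PySem.Dict.contains_insert]; simp [hx]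
  by_cases hw : d.contains w = true
  · have hw' : (d.insert x v).contains w = true := by
      rw [PySem.Dict.contains_insert]; simp [hw]
    rw [PySem.Dict.items_insert_of_contains _ u hw', PySem.Dict.items_insert_of_contains _ v hx,
        PySem.Dict.items_insert_of_contains _ v hx', PySem.Dict.items_insert_of_contains _ u hw]
    simp only [List.map_map]
    apply List.map_congr_left
    intro p _
    by_cases h1 : p.1 = x <;> by_cases h2 : p.1 = w <;>
      simp [Function.comp, h1, h2, hne, Ne.symm hne]
  · have hw0 : d.contains w = false := by simp [hw]
    have hw' : (d.insert x v).contains w = false := by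
      rw [PySem.Dict.contains_insert]; simp [hw0, hne]
    rw [PySem.Dict.items_insert_of_not_contains _ u hw', PySem.Dict.items_insert_of_contains _ v hx,
        PySem.Dict.items_insert_of_contains _ v hx', PySem.Dict.items_insert_of_not_contains _ u hw0]
    simp
    intro h; exact absurd h hne

theorem pv_insert_getD_self {ν : Type} (d : PySem.Dict String ν) (k : String) (dflt : ν)
    (hnd : d.keys.Nodup) (hc : d.contains k = true) :
    d.insert k (d.getD k dflt) = d := by
  apply PySem.Dict.ext
  rw [PySem.Dict.items_insert_of_contains _ _ hc]
  conv_rhs => rw [← List.map_id d.items]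
  apply List.map_congr_left
  intro p hp
  by_cases h1 : p.1 = k
  · have : (k, p.2) ∈ d.items := by rw [← h1]; exact hp
    have hg := PySem.Dict.getD_of_mem_items d this hnd dflt
    rw [show ((p.1 == k) = true) from by simp [h1], if_pos rfl, hg, ← h1]; rfl
  · simp [h1]

theorem pv_getD_foldl_gc_not_mem (c : String → Int) (x : String) :
    ∀ (L : List String), x ∉ L → ∀ (d : PySem.Dict String Int),
      (L.foldl (pvGC c) d).getD x 0 = d.getD x 0 := by
  intro L
  induction L with
  | nil => intro _ d; rfl
  | cons w L ih =>
    intro hx d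
    rw [List.foldl_cons, ih (fun h => hx (List.mem_cons_of_mem _ h))]
    have hne : x ≠ w := fun h => hx (h ▸ List.mem_cons_self)
    exact PySem.Dict.getD_insert_of_ne d _ 0 hne

theorem pv_foldl_gc_insert_comm (c : String → Int) (x : String) :
    ∀ (L : List String), x ∉ L → ∀ (d : PySem.Dict String Int) (a : Int),
      d.contains x = true →
      L.foldl (pvGC c) (d.insert x a) = (L.foldl (pvGC c) d).insert x a := by
  intro L
  induction L with
  | nil => intro _ d a _; rfl
  | cons w L ih =>
    intro hx d a hd
    have hxw : x ≠ w := fun h => hx (h ▸ List.mem_cons_self)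
    have hxL : x ∉ L := fun h => hx (List.mem_cons_of_mem _ h)
    rw [List.foldl_cons, List.foldl_cons]
    show L.foldl (pvGC c) ((d.insert x a).insert w ((d.insert x a).getD w 0 + c w)) = _
    rw [PySem.Dict.getD_insert_of_ne d a 0 (Ne.symm hxw),
        pv_insert_comm_of_contains d x w a _ hd (Ne.symm hxw)]
    rw [ih hxL _ a (by rw [PySem.Dict.contains_insert]; simp [hd])]
    rfl

-- key-side: the per-occurrence fold equals the per-distinct-word fold with counts
theorem pv_bump_eq_gc :
    ∀ (xs : List String) (d : PySem.Dict String Int),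
      xs.foldl pvBump d = (PySem.Set.ofList xs).foldl (pvGC (fun w => (xs.count w : Int))) d := by
  intro xs
  induction xs using List.reverseRecOn with
  | nil => intro d; rfl
  | append_singleton xs x ih =>
    intro d
    rw [List.foldl_append, List.foldl_cons, List.foldl_nil, ih, PySem.Set.ofList_append_singleton]
    by_cases hx : x ∈ xs
    · have hmem : x ∈ PySem.Set.ofList xs := (PySem.Set.mem_ofList xs x).mpr hx
      rw [PySem.Set.add_of_mem hmem]
      obtain ⟨L1, L2, hsplit⟩ := List.append_of_mem hmem
      have hnd := PySem.Set.nodup_ofList xs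
      rw [hsplit] at hnd
      have hndm : (x :: (L1 ++ L2)).Nodup := List.perm_middle.nodup hnd
      have hxx : x ∉ L1 ++ L2 := (List.nodup_cons.mp hndm).1
      have hx1 : x ∉ L1 := fun h => hxx (List.mem_append.mpr (Or.inl h))
      have hx2 : x ∉ L2 := fun h => hxx (List.mem_append.mpr (Or.inr h))
      rw [hsplit, List.foldl_append, List.foldl_append, List.foldl_cons, List.foldl_cons]
      have hcongr1 : L1.foldl (pvGC (fun w => ((xs ++ [x]).count w : Int))) d
          = L1.foldl (pvGC (fun w => (xs.count w : Int))) d := by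
        apply PySem.List.foldl_congr_mem
        intro acc w hw
        have hwx : x ≠ w := fun h => hx1 (h ▸ hw)
        simp [pvGC, List.count_append, hwx]
      rw [hcongr1]
      set D1 := L1.foldl (pvGC (fun w => (xs.count w : Int))) d with hD1
      have hcongr2 : ∀ (e : PySem.Dict String Int),
          L2.foldl (pvGC (fun w => ((xs ++ [x]).count w : Int))) e
          = L2.foldl (pvGC (fun w => (xs.count w : Int))) e := by
        intro e
        apply PySem.List.foldl_congr_mem
        intro acc w hw
        have hwx : x ≠ w := fun h => hx2 (h ▸ hw)
        simp [pvGC, List.count_append, hwx]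
      rw [hcongr2]
      have hcnt : ((xs ++ [x]).count x : Int) = (xs.count x : Int) + 1 := by
        simp [List.count_append]
      have hinit_old : pvGC (fun w => (xs.count w : Int)) D1 x
          = D1.insert x (D1.getD x 0 + (xs.count x : Int)) := rfl
      have hinit_new : pvGC (fun w => ((xs ++ [x]).count w : Int)) D1 x
          = (D1.insert x (D1.getD x 0 + (xs.count x : Int))).insert x
              (D1.getD x 0 + (xs.count x : Int) + 1) := by
        rw [PySem.Dict.insert_insert_self]
        simp [pvGC, add_assoc]
      rw [hinit_old, hinit_new]
      rw [pv_foldl_gc_insert_comm _ x L2 hx2 _ _ (PySem.Dict.contains_insert_self D1 x _)]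
      have hgetD : (L2.foldl (pvGC (fun w => (xs.count w : Int)))
          (D1.insert x (D1.getD x 0 + (xs.count x : Int)))).getD x 0
          = D1.getD x 0 + (xs.count x : Int) := by
        rw [pv_getD_foldl_gc_not_mem _ x L2 hx2, PySem.Dict.getD_insert_self]
      simp only [pvBump]
      rw [hgetD]
    · have hmem : x ∉ PySem.Set.ofList xs := fun h => hx ((PySem.Set.mem_ofList xs x).mp h)
      rw [PySem.Set.add_of_not_mem hmem, List.foldl_append, List.foldl_cons, List.foldl_nil]
      have hcongr1 : (PySem.Set.ofList xs).foldl (pvGC (fun w => ((xs ++ [x]).count w : Int))) d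
          = (PySem.Set.ofList xs).foldl (pvGC (fun w => (xs.count w : Int))) d := by
        apply PySem.List.foldl_congr_mem
        intro acc w hw
        have hwx : x ≠ w := fun h => hmem (h ▸ hw)
        simp [pvGC, List.count_append, hwx]
      rw [hcongr1]
      have hcnt : ((xs ++ [x]).count x : Int) = 1 := by
        simp [List.count_append, List.count_eq_zero.mpr hx]
      simp [pvGC, pvBump, List.count_eq_zero.mpr hx]

theorem pv_contains_foldl_zero_mono (x : String) :
    ∀ (L : List String) (d : PySem.Dict String Int), d.contains x = true →
      (L.foldl pvZero d).contains x = true := by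
  intro L
  induction L with
  | nil => intro d h; exact h
  | cons w L ih =>
    intro d h
    rw [List.foldl_cons]
    apply ih
    unfold pvZero
    split
    · exact h
    · rw [PySem.Dict.contains_insert]; simp [h]

theorem pv_contains_foldl_zero (x : String) :
    ∀ (xs : List String) (d : PySem.Dict String Int), x ∈ xs →
      (xs.foldl pvZero d).contains x = true := by
  intro xs
  induction xs with
  | nil => intro d h; cases h
  | cons w t ih =>
    intro d h
    rw [List.foldl_cons]
    rcases List.mem_cons.mp h with h | h
    · subst h
      apply pv_contains_foldl_zero_mono
      unfold pvZero
      split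
      · assumption
      · exact PySem.Dict.contains_insert_self d x 0
    · exact ih (pvZero d w) h

-- other-side: the per-occurrence fold equals the fold over the distinct words
theorem pv_zero_eq_dedup :
    ∀ (xs : List String) (d : PySem.Dict String Int),
      xs.foldl pvZero d = (PySem.Set.ofList xs).foldl pvZero d := by
  intro xs
  induction xs using List.reverseRecOn with
  | nil => intro d; rfl
  | append_singleton xs x ih =>
    intro d
    rw [List.foldl_append, List.foldl_cons, List.foldl_nil, ih, PySem.Set.ofList_append_singleton]
    by_cases hx : x ∈ xs
    · rw [PySem.Set.add_of_mem ((PySem.Set.mem_ofList xs x).mpr hx), ← ih]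
      have hc := pv_contains_foldl_zero x xs d hx
      simp only [pvZero] at hc ⊢
      rw [if_pos hc]
    · rw [PySem.Set.add_of_not_mem (fun h => hx ((PySem.Set.mem_ofList xs x).mp h)),
          List.foldl_append, List.foldl_cons, List.foldl_nil]

theorem pv_stepA_red (key other_key : String) (hne : key ≠ other_key)
    (D : PySem.Dict String (PySem.Dict String Int)) (w : String)
    (hnd : D.keys.Nodup) (hk : D.contains key = true) (ho : D.contains other_key = true) :
    pvStepA key other_key D w =
      (D.insert key (pvBump (D.getD key PySem.Dict.empty) w)).insert other_key
        (pvZero (D.getD other_key PySem.Dict.empty) w) := by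
  unfold pvStepA
  dsimp only
  by_cases hkw : (D.getD key PySem.Dict.empty).contains w = true
  · rw [if_pos hkw]
    by_cases how : (D.getD other_key PySem.Dict.empty).contains w = true
    · rw [if_pos how]
      have h2 : (D.getD key PySem.Dict.empty).modify w 0 (· + 1)
          = pvBump (D.getD key PySem.Dict.empty) w := rfl
      rw [h2]
      have h3 : pvZero (D.getD other_key PySem.Dict.empty) w
          = D.getD other_key PySem.Dict.empty := by unfold pvZero; rw [if_pos how]
      rw [h3]
      have h4 : (D.insert key (pvBump (D.getD key PySem.Dict.empty) w)).getD other_key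
          PySem.Dict.empty = D.getD other_key PySem.Dict.empty :=
        PySem.Dict.getD_insert_of_ne D _ _ (Ne.symm hne)
      rw [← h4]
      refine (pv_insert_getD_self _ other_key PySem.Dict.empty ?_ ?_).symm
      · rw [PySem.Dict.keys_insert_of_contains D _ hk]; exact hnd
      · rw [PySem.Dict.contains_insert]; simp [ho]
    · rw [if_neg how]
      have h1 : (D.insert other_key ((D.getD other_key PySem.Dict.empty).insert w 0)).getD key
          PySem.Dict.empty = D.getD key PySem.Dict.empty :=
        PySem.Dict.getD_insert_of_ne D _ _ hne
      rw [h1]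
      have h2 : (D.getD key PySem.Dict.empty).modify w 0 (· + 1)
          = pvBump (D.getD key PySem.Dict.empty) w := rfl
      rw [h2]
      have h3 : pvZero (D.getD other_key PySem.Dict.empty) w
          = (D.getD other_key PySem.Dict.empty).insert w 0 := by
        unfold pvZero; rw [if_neg how]
      rw [h3]
      exact pv_insert_comm_of_contains D other_key key _ _ ho hne
  · rw [if_neg hkw]
    have hkw0 : (D.getD key PySem.Dict.empty).contains w = false := by simp [hkw]
    have hodD : (D.insert key ((D.getD key PySem.Dict.empty).insert w 0)).getD other_key
        PySem.Dict.empty = D.getD other_key PySem.Dict.empty :=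
      PySem.Dict.getD_insert_of_ne D _ _ (Ne.symm hne)
    rw [hodD]
    have hbump : ((D.getD key PySem.Dict.empty).insert w 0).modify w 0 (· + 1)
        = pvBump (D.getD key PySem.Dict.empty) w := by
      show ((D.getD key PySem.Dict.empty).insert w 0).insert w
        (((D.getD key PySem.Dict.empty).insert w 0).getD w 0 + 1) = _
      rw [PySem.Dict.getD_insert_self, PySem.Dict.insert_insert_self]
      unfold pvBump
      rw [PySem.Dict.getD_of_not_contains _ 0 hkw0]
    by_cases how : (D.getD other_key PySem.Dict.empty).contains w = true
    · rw [if_pos how]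
      have h1 : (D.insert key ((D.getD key PySem.Dict.empty).insert w 0)).getD key
          PySem.Dict.empty = (D.getD key PySem.Dict.empty).insert w 0 :=
        PySem.Dict.getD_insert_self D key _ _
      rw [h1, hbump, PySem.Dict.insert_insert_self]
      have h3 : pvZero (D.getD other_key PySem.Dict.empty) w
          = D.getD other_key PySem.Dict.empty := by unfold pvZero; rw [if_pos how]
      rw [h3]
      have h4 : (D.insert key (pvBump (D.getD key PySem.Dict.empty) w)).getD other_key
          PySem.Dict.empty = D.getD other_key PySem.Dict.empty :=
        PySem.Dict.getD_insert_of_ne D _ _ (Ne.symm hne)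
      rw [← h4]
      refine (pv_insert_getD_self _ other_key PySem.Dict.empty ?_ ?_).symm
      · rw [PySem.Dict.keys_insert_of_contains D _ hk]; exact hnd
      · rw [PySem.Dict.contains_insert]; simp [ho]
    · rw [if_neg how]
      have h1 : ((D.insert key ((D.getD key PySem.Dict.empty).insert w 0)).insert other_key
          ((D.getD other_key PySem.Dict.empty).insert w 0)).getD key PySem.Dict.empty
          = (D.getD key PySem.Dict.empty).insert w 0 := by
        rw [PySem.Dict.getD_insert_of_ne _ _ _ hne, PySem.Dict.getD_insert_self]
      rw [h1, hbump]
      have h3 : pvZero (D.getD other_key PySem.Dict.empty) w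
          = (D.getD other_key PySem.Dict.empty).insert w 0 := by
        unfold pvZero; rw [if_neg how]
      rw [h3]
      rw [pv_insert_comm_of_contains (D.insert key ((D.getD key PySem.Dict.empty).insert w 0))
        other_key key _ _ (by rw [PySem.Dict.contains_insert]; simp [ho]) hne]
      rw [PySem.Dict.insert_insert_self]

theorem pv_foldA_eq (key other_key : String) (hne : key ≠ other_key) :
    ∀ (xs : List String) (D : PySem.Dict String (PySem.Dict String Int)),
      D.keys.Nodup → D.contains key = true → D.contains other_key = true →
      xs.foldl (pvStepA key other_key) D =
        (D.insert key (xs.foldl pvBump (D.getD key PySem.Dict.empty))).insert other_key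
          (xs.foldl pvZero (D.getD other_key PySem.Dict.empty)) := by
  intro xs
  induction xs with
  | nil =>
    intro D hnd hk ho
    rw [List.foldl_nil, List.foldl_nil, List.foldl_nil,
        pv_insert_getD_self D key PySem.Dict.empty hnd hk]
    exact (pv_insert_getD_self D other_key PySem.Dict.empty hnd ho).symm
  | cons w t ih =>
    intro D hnd hk ho
    rw [List.foldl_cons, pv_stepA_red key other_key hne D w hnd hk ho]
    have hco : (D.insert key (pvBump (D.getD key PySem.Dict.empty) w)).contains other_key = true := by
      rw [PySem.Dict.contains_insert]; simp [ho]
    have hnd' : ((D.insert key (pvBump (D.getD key PySem.Dict.empty) w)).insert other_key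
        (pvZero (D.getD other_key PySem.Dict.empty) w)).keys.Nodup := by
      rw [PySem.Dict.keys_insert_of_contains _ _ hco, PySem.Dict.keys_insert_of_contains _ _ hk]
      exact hnd
    have hk' : ((D.insert key (pvBump (D.getD key PySem.Dict.empty) w)).insert other_key
        (pvZero (D.getD other_key PySem.Dict.empty) w)).contains key = true := by
      rw [PySem.Dict.contains_insert, PySem.Dict.contains_insert]; simp [hk]
    have ho' : ((D.insert key (pvBump (D.getD key PySem.Dict.empty) w)).insert other_key
        (pvZero (D.getD other_key PySem.Dict.empty) w)).contains other_key = true :=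
      PySem.Dict.contains_insert_self _ _ _
    rw [ih _ hnd' hk' ho']
    have hgk : ((D.insert key (pvBump (D.getD key PySem.Dict.empty) w)).insert other_key
        (pvZero (D.getD other_key PySem.Dict.empty) w)).getD key PySem.Dict.empty
        = pvBump (D.getD key PySem.Dict.empty) w := by
      rw [PySem.Dict.getD_insert_of_ne _ _ _ hne, PySem.Dict.getD_insert_self]
    have hgo : ((D.insert key (pvBump (D.getD key PySem.Dict.empty) w)).insert other_key
        (pvZero (D.getD other_key PySem.Dict.empty) w)).getD other_key PySem.Dict.empty
        = pvZero (D.getD other_key PySem.Dict.empty) w := PySem.Dict.getD_insert_self _ _ _ _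
    rw [hgk, hgo]
    rw [pv_insert_comm_of_contains (D.insert key (pvBump (D.getD key PySem.Dict.empty) w))
      other_key key _ _ hco hne]
    rw [PySem.Dict.insert_insert_self, PySem.Dict.insert_insert_self,
        List.foldl_cons, List.foldl_cons]

theorem pv_foldl_prod {α β γ : Type} (f : β → α → β) (g : γ → α → γ) :
    ∀ (L : List α) (p : β × γ),
      L.foldl (fun p x => (f p.1 x, g p.2 x)) p = (L.foldl f p.1, L.foldl g p.2) := by
  intro L
  induction L with
  | nil => intro p; rfl
  | cons a L ih => intro p; rw [List.foldl_cons, ih]; rfl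

theorem pv_setdefault_eq_zero (d : PySem.Dict String Int) (w : String) :
    d.setdefault w 0 = pvZero d w := by
  unfold pvZero
  by_cases h : d.contains w = true
  · rw [if_pos h, PySem.Dict.setdefault_of_contains d 0 h]
  · have h0 : d.contains w = false := by simp [h]
    rw [if_neg (by simp [h0]), PySem.Dict.setdefault_of_not_contains d 0 h0]

-- ===== VERDICT (by name: the statement is the Claim_ definition above) =====
theorem pv_bump_eq_gc' (xs : List String) (d : PySem.Dict String Int) :
    xs.foldl pvBump d
      = (PySem.Set.ofList xs).foldl
          (fun d w => d.insert w (d.getD w 0 + (xs.count w : Int))) d :=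
  pv_bump_eq_gc xs d

theorem pv_zero_eq_setdefault (xs : List String) (d : PySem.Dict String Int) :
    xs.foldl pvZero d = (PySem.Set.ofList xs).foldl (fun d w => d.setdefault w 0) d := by
  rw [pv_zero_eq_dedup]
  apply PySem.List.foldl_congr_mem
  intro acc w _
  exact (pv_setdefault_eq_zero acc w).symm

theorem pv_pair (L : List (String × Int)) (p : PySem.Dict String Int × PySem.Dict String Int) :
    L.foldl (fun p wc => (p.1.insert wc.1 (p.1.getD wc.1 0 + wc.2), p.2.setdefault wc.1 0)) p
      = (L.foldl (fun d wc => d.insert wc.1 (d.getD wc.1 0 + wc.2)) p.1,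
         L.foldl (fun d wc => d.setdefault wc.1 0) p.2) :=
  pv_foldl_prod (fun d wc => d.insert wc.1 (d.getD wc.1 0 + wc.2))
    (fun d wc => d.setdefault wc.1 0) L p

theorem pv_main (key other_key : String) (hne : key ≠ other_key)
    (sentence : List String) (fd : List (String × List (String × Int)))
    (hk : key ∈ fd.map (·.1)) (ho : other_key ∈ fd.map (·.1)) (hnd : (fd.map (·.1)).Nodup) :
    (sentence.foldl (pvStepA key other_key)
        (PySem.Dict.mk (fd.map (fun p => (p.1, PySem.Dict.mk p.2))))).items.map
          (fun p => (p.1, p.2.items))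
    = (((PySem.Dict.mk (fd.map (fun p => (p.1, PySem.Dict.mk p.2)))).insert key
          ((List.foldl (fun c w => c.insert w (c.getD w 0 + 1)) PySem.Dict.empty sentence).items.foldl
              (fun p wc => (p.1.insert wc.1 (p.1.getD wc.1 0 + wc.2), p.2.setdefault wc.1 0))
              ((PySem.Dict.mk (fd.map (fun p => (p.1, PySem.Dict.mk p.2)))).getD key PySem.Dict.empty,
               (PySem.Dict.mk (fd.map (fun p => (p.1, PySem.Dict.mk p.2)))).getD other_key PySem.Dict.empty)).1).insert
        other_key
          ((List.foldl (fun c w => c.insert w (c.getD w 0 + 1)) PySem.Dict.empty sentence).items.foldl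
              (fun p wc => (p.1.insert wc.1 (p.1.getD wc.1 0 + wc.2), p.2.setdefault wc.1 0))
              ((PySem.Dict.mk (fd.map (fun p => (p.1, PySem.Dict.mk p.2)))).getD key PySem.Dict.empty,
               (PySem.Dict.mk (fd.map (fun p => (p.1, PySem.Dict.mk p.2)))).getD other_key PySem.Dict.empty)).2).items.map
          (fun q => (q.1, q.2.items)) := by
  have hkeys : (PySem.Dict.mk (fd.map (fun p => (p.1, PySem.Dict.mk p.2)))).keys = fd.map (·.1) := by
    simp [PySem.Dict.keys, List.map_map, Function.comp]
  have hck : (PySem.Dict.mk (fd.map (fun p => (p.1, PySem.Dict.mk p.2)))).contains key = true :=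
    (PySem.Dict.contains_iff_mem_keys _ _).mpr (by rw [hkeys]; exact hk)
  have hco : (PySem.Dict.mk (fd.map (fun p => (p.1, PySem.Dict.mk p.2)))).contains other_key = true :=
    (PySem.Dict.contains_iff_mem_keys _ _).mpr (by rw [hkeys]; exact ho)
  have hndk : (PySem.Dict.mk (fd.map (fun p => (p.1, PySem.Dict.mk p.2)))).keys.Nodup := by
    rw [hkeys]; exact hnd
  rw [pv_foldA_eq key other_key hne sentence _ hndk hck hco]
  rw [PySem.Dict.foldl_insert_getD_add_one_eq_counter sentence, pv_pair]
  rw [PySem.Dict.items_counter, List.foldl_map, List.foldl_map]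
  dsimp only
  rw [← pv_bump_eq_gc', ← pv_zero_eq_setdefault]

theorem add_sentence_to_frequency_dict_spec : Claim_equal_add_sentence_to_frequency_dict := by
  intro sentence fd ip _ hpre
  obtain ⟨hp, hn, hnd, _⟩ := hpre
  unfold Spec_add_sentence_to_frequency_dict
  unfold add_sentence_to_frequency_dict add_sentence_to_frequency_dict_alt
  cases ip
  · simp only [Bool.false_eq_true, if_false]
    exact pv_main "negative_words" "positive_words" (by decide) sentence fd hn hp hnd
  · simp only [if_true]
    exact pv_main "positive_words" "negative_words" (by decide) sentence fd hp hn hnd
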